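-- pv_equiv track=rewrite | github.com/PrinceSinghhub/GFG-Questions | Is it Fibonacci.py | solve
-- ===== SOURCE A (Python) =====
-- def solve(n, k, arr):
--     su, m, i = sum(arr), n - k - 1, 0
--     if m < 0:
--         return arr[n - 1]
--     arr.append(su)
--     for i in range(m):
--         su += arr[-1] - arr[i]
--         arr.append(su)
--     return arr[-1]
-- ===== SOURCE B (Python) =====
-- def solve(n, k, arr):
--     # Recompute the length-w window sum directly each step instead of
--     # maintaining a running sum; same appends, same return value.
--     m = n - k - 1
--     if m < 0:
--         return arr[n - 1]
--     w = len(arr)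
--     for _ in range(m + 1):
--         arr.append(sum(arr[-w:]))
--     return arr[-1]
-- ===== Notes on version B (the rewrite author's own statement) =====
-- stated objective: simpler
-- what changed: Replaces A's incremental running-sum update (su += arr[-1] - arr[i]) with a direct recomputation of the length-w sliding-window sum on each of the m+1 appends.
import Mathlib
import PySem

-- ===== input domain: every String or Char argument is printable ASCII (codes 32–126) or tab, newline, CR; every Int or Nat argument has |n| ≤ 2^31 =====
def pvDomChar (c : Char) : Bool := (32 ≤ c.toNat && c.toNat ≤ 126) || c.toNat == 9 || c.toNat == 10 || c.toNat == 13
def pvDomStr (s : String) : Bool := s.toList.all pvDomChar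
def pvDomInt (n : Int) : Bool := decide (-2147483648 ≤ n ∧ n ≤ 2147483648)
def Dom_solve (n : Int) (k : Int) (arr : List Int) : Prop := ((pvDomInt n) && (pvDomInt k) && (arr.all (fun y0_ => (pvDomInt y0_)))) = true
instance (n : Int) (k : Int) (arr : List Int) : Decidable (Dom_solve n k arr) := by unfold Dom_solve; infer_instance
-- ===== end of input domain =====

-- B replaces A's incremental running-sum update with a direct recomputation of the
-- length-w window sum at each append (objective: simpler).
-- NOTE: both Pythons mutate arr in place identically; the claim is about the return value.

-- ===== PORT A =====
def solve (n : Int) (k : Int) (arr : List Int) : Int :=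
  let su := arr.sum
  let m := n - k - 1
  if m < 0 then (PySem.List.pyGet? arr (n - 1)).getD 0
  else
    let st := (PySem.List.pyRange 0 m 1).foldl
      (fun (st : List Int × Int) (i : Int) =>
        let su' := st.2 + ((PySem.List.pyGet? st.1 (-1)).getD 0 - (PySem.List.pyGet? st.1 i).getD 0)
        (st.1 ++ [su'], su'))
      (arr ++ [su], su)
    (PySem.List.pyGet? st.1 (-1)).getD 0

-- ===== PORT B =====
def solve_alt (n : Int) (k : Int) (arr : List Int) : Int :=
  let m := n - k - 1
  if m < 0 then (PySem.List.pyGet? arr (n - 1)).getD 0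
  else
    let w : Int := arr.length
    let arr2 := (PySem.List.pyRange 0 (m + 1) 1).foldl
      (fun (a : List Int) (_ : Int) => a ++ [(PySem.List.slice a (some (-w)) none).sum]) arr
    (PySem.List.pyGet? arr2 (-1)).getD 0

-- ===== PRECONDITION & SPEC =====
-- Pre_ excludes only inputs where A raises IndexError: m < 0 with arr[n-1] out of range
-- (B raises identically there).
def Pre_solve (n : Int) (k : Int) (arr : List Int) : Prop :=
  n - k - 1 < 0 → PySem.Raise.InRange arr.length (n - 1)
instance (n : Int) (k : Int) (arr : List Int) : Decidable (Pre_solve n k arr) := by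
  unfold Pre_solve; infer_instance

def pvWitness_solve : Int × Int × List Int := (5, 2, [1, 2])

def Spec_solve (n : Int) (k : Int) (arr : List Int) (out : Int) : Prop := out = solve_alt n k arr
instance (n : Int) (k : Int) (arr : List Int) (out : Int) : Decidable (Spec_solve n k arr out) := by
  unfold Spec_solve; infer_instance

-- ===== CLAIM (what is proved, stated in full; the proofs are below) =====
def Claim_equal_solve : Prop := ∀ (n : Int) (k : Int) (arr : List Int), Dom_solve n k arr → Pre_solve n k arr → Spec_solve n k arr (solve n k arr)

-- ===== LEMMAS AND PROOFS =====

-- A's loop state after j iterations, over the underlying Nat range.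
def aFold (arr : List Int) (j : Nat) : List Int × Int :=
  (List.range j).foldl
    (fun (st : List Int × Int) (i : Nat) =>
      let su' := st.2 + ((PySem.List.pyGet? st.1 (-1)).getD 0 - (PySem.List.pyGet? st.1 (i : Int)).getD 0)
      (st.1 ++ [su'], su'))
    (arr ++ [arr.sum], arr.sum)

-- B's list after j appends.
def bFold (arr : List Int) (j : Nat) : List Int :=
  (List.range j).foldl
    (fun (a : List Int) (_ : Nat) => a ++ [(PySem.List.slice a (some (-(arr.length : Int))) none).sum]) arr

theorem aFold_succ (arr : List Int) (j : Nat) :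
    aFold arr (j + 1) =
      (let st := aFold arr j
       let su' := st.2 + ((PySem.List.pyGet? st.1 (-1)).getD 0 - (PySem.List.pyGet? st.1 (j : Int)).getD 0)
       ((st.1 ++ [su'], su') : List Int × Int)) := by
  simp [aFold, List.range_succ]

theorem bFold_succ (arr : List Int) (j : Nat) :
    bFold arr (j + 1) =
      bFold arr j ++ [(PySem.List.slice (bFold arr j) (some (-(arr.length : Int))) none).sum] := by
  simp [bFold, List.range_succ]

-- main invariant relating A's fold state to B's list
theorem invariant (arr : List Int) (j : Nat) :
    (aFold arr j).1 = bFold arr (j + 1) ∧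
    (aFold arr j).1.length = arr.length + 1 + j ∧
    (aFold arr j).2 = (((aFold arr j).1.drop j).take arr.length).sum ∧
    (aFold arr j).1.getLastD 0 = (aFold arr j).2 ∧
    (arr = [] → ∀ x ∈ (aFold arr j).1, x = 0) := by
  induction j with
  | zero =>
    refine ⟨?_, by simp [aFold], ?_, ?_, ?_⟩
    · rcases Nat.eq_zero_or_pos arr.length with h0 | hpos
      · have : arr = [] := List.eq_nil_of_length_eq_zero h0
        subst this
        simp [aFold, bFold, PySem.List.slice]
      · simp [aFold, bFold, List.range_succ,
          PySem.List.slice_from_neg_natCast arr arr.length hpos]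
    · simp [aFold]
    · simp [aFold]
    · intro h; subst h; simp [aFold]
  | succ j ih =>
    obtain ⟨hab, hlen, hsum, hlast, hzero⟩ := ih
    set a := (aFold arr j).1 with ha
    set s := (aFold arr j).2 with hs
    set w := arr.length with hw
    have hj : j < a.length := by omega
    have hane : a ≠ [] := by intro h; rw [h] at hlen; simp at hlen; omega
    have hgetneg : (PySem.List.pyGet? a (-1)).getD 0 = a.getLastD 0 := by
      rw [PySem.List.pyGet?_neg_one]
      exact Eq.symm List.getLastD_eq_getLast?
    have hgetj : (PySem.List.pyGet? a ((j : Nat) : Int)).getD 0 = a[j] := by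
      rw [PySem.List.pyGet?_natCast]
      simp [List.getElem?_eq_getElem hj]
    set s' := s + (a.getLastD 0 - a[j]) with hs'
    have hstep : aFold arr (j + 1) = (a ++ [s'], s') := by
      rw [aFold_succ]
      simp only [← ha, ← hs, hgetneg, hgetj, ← hs']
    have hdropcons : a.drop j = a[j] :: a.drop (j + 1) := List.drop_eq_getElem_cons hj
    -- the last element of a, seen as the tail of drop j
    have hgl : a.getLastD 0 = a.getLast hane := by
      rw [List.getLastD_eq_getLast?, List.getLast?_eq_some_getLast hane]
      simp
    have hlast_elem : a.drop (j + w) = [a.getLastD 0] := by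
      have hjw : j + w = a.length - 1 := by omega
      rw [hjw, List.drop_length_sub_one hane, hgl]
    have hsum_drop : (a.drop j).sum = s + a.getLastD 0 := by
      have h1 : a.drop j = (a.drop j).take w ++ (a.drop j).drop w :=
        (List.take_append_drop _ _).symm
      have h2 : (a.drop j).drop w = a.drop (j + w) := by
        rw [List.drop_drop]
      calc (a.drop j).sum = ((a.drop j).take w).sum + ((a.drop j).drop w).sum := by
            rw [← List.sum_append, ← h1]
        _ = s + a.getLastD 0 := by rw [h2, hlast_elem, ← hsum]; simp
    have hnext : (a.drop (j + 1)).sum = s' := by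
      have : (a.drop j).sum = a[j] + (a.drop (j + 1)).sum := by
        rw [hdropcons, List.sum_cons]
      omega
    have hs'0 : arr = [] → s' = 0 := by
      intro he
      have h1 : a.getLastD 0 = 0 := by
        refine hzero he _ ?_
        rw [hgl]
        exact List.getLast_mem hane
      have h2 : a[j] = 0 := hzero he _ (List.getElem_mem hj)
      have hw0 : w = 0 := by rw [hw, he]; rfl
      have h3 : s = 0 := by
        rw [hsum, hw0]; simp
      rw [hs', h1, h2, h3]; ring
    have happend : s' = (PySem.List.slice a (some (-(w : Int))) none).sum := by
      rcases Nat.eq_zero_or_pos w with h0 | hpos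
      · have he : arr = [] := List.eq_nil_of_length_eq_zero h0
        have hsl : PySem.List.slice a (some (-(w : Int))) none = a := by
          rw [h0]; simp
        rw [hsl, List.sum_eq_zero (hzero he), hs'0 he]
      · rw [PySem.List.slice_from_neg_natCast a w hpos]
        have : a.length - w = j + 1 := by omega
        rw [this, hnext]
    refine ⟨?_, ?_, ?_, ?_, ?_⟩
    · rw [hstep, bFold_succ, ← hab, happend]
    · rw [hstep]; simp; omega
    · rw [hstep]
      simp only
      have hd : (a ++ [s']).drop (j + 1) = a.drop (j + 1) ++ [s'] := by
        rw [List.drop_append_of_le_length (by omega)]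
      rw [hd]
      have hlen2 : (a.drop (j + 1)).length = w := by simp; omega
      rw [List.take_append_of_le_length (by omega), List.take_of_length_le (by omega)]
      exact hnext.symm
    · rw [hstep]; simp
    · rw [hstep]
      intro he x hx
      simp at hx
      rcases hx with hx | hx
      · exact hzero he x hx
      · rw [hx]; exact hs'0 he

theorem solve_eq_aFold (n k : Int) (arr : List Int) (h : ¬ n - k - 1 < 0) :
    solve n k arr = (aFold arr (n - k - 1).toNat).1.getLastD 0 := by
  simp only [solve, if_neg h, aFold, PySem.List.pyRange_one, List.foldl_map,
    PySem.List.pyGet?_neg_one, zero_add, Int.sub_zero]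
  rw [List.getLastD_eq_getLast?]

theorem solve_alt_eq_bFold (n k : Int) (arr : List Int) (h : ¬ n - k - 1 < 0) :
    solve_alt n k arr = (bFold arr ((n - k - 1).toNat + 1)).getLastD 0 := by
  have hr : (n - k - 1 + 1).toNat = (n - k - 1).toNat + 1 := by omega
  simp only [solve_alt, if_neg h, bFold, PySem.List.pyRange_one, List.foldl_map,
    PySem.List.pyGet?_neg_one, Int.sub_zero]
  rw [hr, List.getLastD_eq_getLast?]

-- ===== VERDICT (by name: the statement is the Claim_ definition above) =====
theorem solve_spec : Claim_equal_solve := by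
  intro n k arr _ _
  unfold Spec_solve
  by_cases h : n - k - 1 < 0
  · simp only [solve, solve_alt]
    rw [if_pos h, if_pos h]
  · rw [solve_eq_aFold n k arr h, solve_alt_eq_bFold n k arr h,
      (invariant arr (n - k - 1).toNat).1]
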